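-- pv_equiv track=rewrite | github.com/DavidLKing/MED-pytorch | error_analysis.py | get_cite
-- ===== SOURCE A (Python) =====
-- def get_cite(form_list):
--     input_forms = []
--     for cite in form_list:
--         cite_input = []
--         cite = cite.split(' ')
--         for elem in cite:
--             if '=' not in elem:
--                 cite_input.append(elem)
--         input_forms.append(''.join(cite_input))
--     return input_forms
-- ===== SOURCE B (Python) =====
-- def get_cite(form_list):
--     # One pass over the characters of each citation: accumulate the current
--     # token, drop it at flush time if it contained '='; no split/join.
--     out = []
--     for cite in form_list:
--         res = []
--         tok = []
--         ok = True
--         for ch in cite: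
--             if ch == ' ':
--                 if ok:
--                     res += tok
--                 tok = []
--                 ok = True
--             else:
--                 tok.append(ch)
--                 if ch == '=':
--                     ok = False
--         if ok:
--             res += tok
--         out.append(''.join(res))
--     return out
-- ===== Notes on version B (the rewrite author's own statement) =====
-- stated objective: alternative
-- what changed: Replaces split-on-space, per-token '=' membership scan and final join with a single character-level pass per citation that accumulates the current token and discards it at each space if it contained '='.
import Mathlib
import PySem

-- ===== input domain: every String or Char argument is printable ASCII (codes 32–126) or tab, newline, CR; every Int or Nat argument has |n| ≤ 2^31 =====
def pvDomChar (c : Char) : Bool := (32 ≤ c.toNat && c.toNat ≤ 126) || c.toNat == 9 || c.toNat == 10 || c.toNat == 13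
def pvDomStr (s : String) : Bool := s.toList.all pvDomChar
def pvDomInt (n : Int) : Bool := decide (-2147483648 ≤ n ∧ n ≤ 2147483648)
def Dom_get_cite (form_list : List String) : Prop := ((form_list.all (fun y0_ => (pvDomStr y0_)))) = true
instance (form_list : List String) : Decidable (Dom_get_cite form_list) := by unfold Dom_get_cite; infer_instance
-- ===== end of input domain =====

-- B replaces A's split-on-space / per-token '='-scan / join with a single
-- character-level pass per citation; return values are proved equal everywhere.

-- ===== PORT A =====
def get_cite (form_list : List String) : List String :=
  form_list.foldl (fun input_forms cite =>
    let parts := PySem.Chars.splitOn cite.toList [' ']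
    let cite_input := parts.foldl
      (fun acc elem => if PySem.Chars.isIn ['='] elem then acc else acc ++ [elem]) []
    input_forms ++ [String.ofList (PySem.Chars.join [] cite_input)]) []

-- ===== PORT B =====
def get_cite_alt (form_list : List String) : List String :=
  form_list.map (fun cite =>
    let fin := cite.toList.foldl
      (fun (st : List Char × List Char × Bool) ch =>
        if ch = ' ' then
          ((if st.2.2 then st.1 ++ st.2.1 else st.1), ([], true))
        else
          (st.1, (st.2.1 ++ [ch], st.2.2 && !(ch == '='))))
      ([], ([], true))
    String.ofList (if fin.2.2 then fin.1 ++ fin.2.1 else fin.1))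

-- ===== PRECONDITION & SPEC =====
def Spec_get_cite (form_list : List String) (out : List String) : Prop := out = get_cite_alt form_list
instance (form_list : List String) (out : List String) : Decidable (Spec_get_cite form_list out) := by unfold Spec_get_cite; infer_instance

-- ===== CLAIM (what is proved, stated in full; the proofs are below) =====
def Claim_equal_get_cite : Prop := ∀ (form_list : List String), Dom_get_cite form_list → Spec_get_cite form_list (get_cite form_list)

-- ===== LEMMAS AND PROOFS =====

-- reference splitter: splitOn cs [' '] with an explicit (reversed) current chunk
def pvSplitAux : List Char → List Char → List (List Char)
  | [], cur => [cur.reverse]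
  | c :: l, cur => if c = ' ' then cur.reverse :: pvSplitAux l [] else pvSplitAux l (c :: cur)

-- reference for B's scan: remaining chars, current token (forward), token still '='-free
def pvG : List Char → List Char → Bool → List Char
  | [], tok, ok => if ok then tok else []
  | c :: l, tok, ok =>
      if c = ' ' then (if ok then tok else []) ++ pvG l [] true
      else pvG l (tok ++ [c]) (ok && !(c == '='))

theorem pvGo_eq (fuel : Nat) (l cur : List Char) (acc : List (List Char))
    (h : l.length ≤ fuel) :
    PySem.Chars.splitOn.go [' '] fuel l cur acc = acc.reverse ++ pvSplitAux l cur := by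
  induction fuel generalizing l cur acc with
  | zero =>
    cases l with
    | nil => simp [PySem.Chars.splitOn.go, pvSplitAux]
    | cons c rest => simp at h
  | succ f ih =>
    cases l with
    | nil => simp [PySem.Chars.splitOn.go, pvSplitAux]
    | cons c rest =>
      simp only [PySem.Chars.splitOn.go]
      by_cases hc : c = ' '
      · subst hc
        have hpre : [' '].isPrefixOf (' ' :: rest) = true := by simp [List.isPrefixOf]
        rw [if_pos hpre, ih _ _ _ (by simpa using h)]
        simp [pvSplitAux]
      · have hpre : [' '].isPrefixOf (c :: rest) = false := by
          simp [List.isPrefixOf]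
          exact fun h => hc h.symm
        rw [if_neg (by simp [hpre]), ih _ _ _ (by simpa using Nat.le_of_succ_le_succ h)]
        simp [pvSplitAux, hc]

theorem pvSplitOn_eq (cs : List Char) :
    PySem.Chars.splitOn cs [' '] = pvSplitAux cs [] := by
  unfold PySem.Chars.splitOn
  rw [pvGo_eq _ _ _ _ (by omega)]
  simp

theorem pvIsIn_eq (e : List Char) : PySem.Chars.isIn ['='] e = e.contains '=' := by
  rcases h : PySem.Chars.isIn ['='] e with _ | _
  · rw [PySem.Chars.isIn_eq_false_iff, List.singleton_infix_iff] at h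
    simpa using h
  · rw [PySem.Chars.isIn_iff_infix, List.singleton_infix_iff] at h
    simpa using h

theorem pvJoin_nil_eq_flatten (l : List (List Char)) :
    PySem.Chars.join [] l = l.flatten := by
  induction l with
  | nil => rfl
  | cons x xs ih =>
    cases xs <;> simp_all [PySem.Chars.join, List.intercalate, List.intersperse]

theorem pvFoldl_filter (l : List (List Char)) :
    l.foldl (fun acc elem => if PySem.Chars.isIn ['='] elem then acc else acc ++ [elem]) []
      = l.filter (fun e => !e.contains '=') := by
  have hfun : (fun (acc : List (List Char)) elem =>
      if PySem.Chars.isIn ['='] elem then acc else acc ++ [elem])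
      = fun acc elem => if (!elem.contains '=') = true then acc ++ [elem] else acc := by
    funext acc elem
    rw [pvIsIn_eq]
    rcases elem.contains '=' <;> simp
  rw [hfun]
  simpa using PySem.List.foldl_append_if (fun e : List Char => !e.contains '=') id l []

-- A's per-citation result equals pvG
theorem pvA_eq_G (cs : List Char) : ∀ cur : List Char,
    ((pvSplitAux cs cur).filter (fun e => !e.contains '=')).flatten
      = pvG cs cur.reverse (!cur.contains '=') := by
  induction cs with
  | nil =>
    intro cur
    by_cases hm : '=' ∈ cur <;>
      simp [pvSplitAux, pvG, hm]
  | cons c l ih =>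
    intro cur
    by_cases hc : c = ' '
    · subst hc
      have h0 := ih []
      simp only [List.reverse_nil, List.contains_nil, Bool.not_false] at h0
      have h0' : (List.filter (fun e => !decide ('=' ∈ e)) (pvSplitAux l [])).flatten
          = pvG l [] true := by simpa using h0
      simp only [pvSplitAux, pvG]
      by_cases hm : '=' ∈ cur <;> simp [hm, h0']
    · simp only [pvSplitAux, pvG, if_neg hc]
      have harg : (!(c :: cur).contains '=') = ((!cur.contains '=') && !(c == '=')) := by
        by_cases hce : c = '=' <;> by_cases hcs : '=' ∈ cur
        all_goals
          have hce' : ('=' = c) ↔ (c = '=') := eq_comm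
          simp [hcs, hce', hce]
      rw [ih (c :: cur), List.reverse_cons, harg]

-- B's fold, flushed, equals pvG
theorem pvB_eq_G (cs : List Char) : ∀ (res tok : List Char) (ok : Bool),
    (let fin := cs.foldl
      (fun (st : List Char × List Char × Bool) ch =>
        if ch = ' ' then
          ((if st.2.2 then st.1 ++ st.2.1 else st.1), ([], true))
        else
          (st.1, (st.2.1 ++ [ch], st.2.2 && !(ch == '='))))
      (res, (tok, ok))
     if fin.2.2 then fin.1 ++ fin.2.1 else fin.1) = res ++ pvG cs tok ok := by
  induction cs with
  | nil =>
    intro res tok ok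
    simp only [List.foldl_nil, pvG]
    rcases ok <;> simp
  | cons c l ih =>
    intro res tok ok
    by_cases hc : c = ' '
    · subst hc
      simp only [List.foldl_cons, pvG]
      rw [ih]
      rcases ok <;> simp
    · simp only [List.foldl_cons, if_neg hc, pvG]
      rw [ih]

theorem pv_per_string (cite : String) :
    String.ofList (PySem.Chars.join []
      ((PySem.Chars.splitOn cite.toList [' ']).foldl
        (fun acc elem => if PySem.Chars.isIn ['='] elem then acc else acc ++ [elem]) []))
    = String.ofList
        (let fin := cite.toList.foldl
          (fun (st : List Char × List Char × Bool) ch =>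
            if ch = ' ' then
              ((if st.2.2 then st.1 ++ st.2.1 else st.1), ([], true))
            else
              (st.1, (st.2.1 ++ [ch], st.2.2 && !(ch == '='))))
          ([], ([], true))
         if fin.2.2 then fin.1 ++ fin.2.1 else fin.1) := by
  rw [pvSplitOn_eq, pvFoldl_filter, pvJoin_nil_eq_flatten, pvB_eq_G]
  have := pvA_eq_G cite.toList []
  simp only [List.reverse_nil, List.contains_nil, Bool.not_false] at this
  rw [this]
  simp

-- ===== VERDICT (by name: the statement is the Claim_ definition above) =====
theorem get_cite_spec : Claim_equal_get_cite := by
  intro form_list _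
  unfold Spec_get_cite get_cite get_cite_alt
  rw [PySem.List.foldl_append_singleton_eq_map]
  apply List.map_congr_left
  intro cite _
  exact pv_per_string cite
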